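-- pv_equiv track=rewrite | github.com/steveydevey/netgrid | create_interface_table.py | create_ascii_table
-- ===== SOURCE A (Python) =====
-- def create_ascii_table(interfaces, media_types):
--     """Create an ASCII table from the interface data."""
--
--     # Table headers
--     headers = ['Interface', 'Link State', 'IP Address', 'Media Type']
--
--     # Calculate column widths
--     col_widths = [len(h) for h in headers]
--
--     # Find maximum width for each column
--     for interface_name, data in interfaces.items():
--         col_widths[0] = max(col_widths[0], len(interface_name))
--         col_widths[1] = max(col_widths[1], len(data['link_state']))
--         col_widths[2] = max(col_widths[2], len(data['ip_address']))
--
--         media_type = media_types.get(interface_name, 'Unknown')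
--         col_widths[3] = max(col_widths[3], len(media_type))
--
--     # Create the table
--     table = []
--
--     # Header row
--     header_row = '| ' + ' | '.join(h.ljust(col_widths[i]) for i, h in enumerate(headers)) + ' |'
--     table.append(header_row)
--
--     # Separator row
--     separator = '|' + '|'.join('-' * (w + 2) for w in col_widths) + '|'
--     table.append(separator)
--
--     # Data rows
--     for interface_name in sorted(interfaces.keys()):
--         data = interfaces[interface_name]
--         media_type = media_types.get(interface_name, 'Unknown')
--
--         row = '| ' + interface_name.ljust(col_widths[0]) + ' | ' + \
--               data['link_state'].ljust(col_widths[1]) + ' | ' + \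
--               data['ip_address'].ljust(col_widths[2]) + ' | ' + \
--               media_type.ljust(col_widths[3]) + ' |'
--         table.append(row)
--
--     return '\n'.join(table)
-- ===== SOURCE B (Python) =====
-- def create_ascii_table(interfaces, media_types):
--     """Create an ASCII table from the interface data (column-major construction)."""
--     names = sorted(interfaces)
--     columns = [
--         ['Interface'] + names,
--         ['Link State'] + [interfaces[n]['link_state'] for n in names],
--         ['IP Address'] + [interfaces[n]['ip_address'] for n in names],
--         ['Media Type'] + [media_types.get(n, 'Unknown') for n in names],
--     ]
--     padded, seps = [], []
--     for col in columns:
--         w = max(map(len, col))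
--         padded.append([c.ljust(w) for c in col])
--         seps.append('-' * (w + 2))
--     lines = ['| ' + ' | '.join(cells) + ' |' for cells in zip(*padded)]
--     return '\n'.join([lines[0], '|' + '|'.join(seps) + '|'] + lines[1:])
-- ===== Notes on version B (the rewrite author's own statement) =====
-- stated objective: alternative
-- what changed: B is column-major: it builds each of the four columns (header plus its cells over the sorted names) as a list, pads every cell of a column to that column's own max length and builds its separator segment in the same per-column step, then transposes the four padded columns with zip to obtain the lines; A is row-major, first folding a running 4-way max over interfaces.items() and then concatenating each row by hand with those widths.
import Mathlib
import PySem

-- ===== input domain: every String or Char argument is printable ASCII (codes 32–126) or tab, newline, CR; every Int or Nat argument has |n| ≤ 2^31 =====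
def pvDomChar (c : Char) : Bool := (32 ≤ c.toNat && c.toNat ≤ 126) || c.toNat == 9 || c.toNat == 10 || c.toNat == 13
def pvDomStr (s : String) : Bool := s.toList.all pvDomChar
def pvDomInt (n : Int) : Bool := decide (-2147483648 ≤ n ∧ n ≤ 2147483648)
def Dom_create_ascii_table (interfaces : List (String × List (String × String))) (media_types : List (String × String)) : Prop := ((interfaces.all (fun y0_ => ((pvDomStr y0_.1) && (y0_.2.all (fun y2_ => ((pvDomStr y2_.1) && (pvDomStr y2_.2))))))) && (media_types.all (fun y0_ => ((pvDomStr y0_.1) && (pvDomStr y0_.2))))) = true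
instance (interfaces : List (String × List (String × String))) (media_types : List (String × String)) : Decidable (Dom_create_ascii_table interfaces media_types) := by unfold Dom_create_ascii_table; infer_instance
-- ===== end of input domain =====

-- B is column-major (each column padded independently, then the padded columns are zipped
-- into lines) instead of A's row-major running-max-then-format; objective: alternative.

-- shared primitive: Python str.ljust at the char-list level (exact: pads with spaces)
def pvLjust (s : String) (w : Nat) : List Char :=
  s.toList ++ List.replicate (w - s.toList.length) ' '

-- ===== PORT A =====
def create_ascii_table (interfaces : List (String × List (String × String))) (media_types : List (String × String)) : String :=
  let idict := PySem.Dict.ofList interfaces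
  let mdict := PySem.Dict.ofList media_types
  -- col_widths = [len(h) for h in headers], then the running-max loop over interfaces.items();
  -- the 4-element list is kept as a 4-tuple (index 0,1,2,3 = components).
  -- data['link_state'] / data['ip_address'] raise KeyError when absent: Pre_ guarantees presence,
  -- so getD with "" is exact there.
  let cw := idict.items.foldl
    (fun (w : Nat × Nat × Nat × Nat) p =>
      let d := PySem.Dict.ofList p.2
      let media_type := mdict.getD p.1 "Unknown"
      (max w.1 p.1.toList.length,
       max w.2.1 (d.getD "link_state" "").toList.length,
       max w.2.2.1 (d.getD "ip_address" "").toList.length,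
       max w.2.2.2 media_type.toList.length))
    ("Interface".toList.length, "Link State".toList.length,
     "IP Address".toList.length, "Media Type".toList.length)
  -- header row: ' | '.join over the enumerated headers literal, written out cell by cell
  let header_row := String.ofList ("| ".toList ++ PySem.Chars.join " | ".toList
    [pvLjust "Interface" cw.1, pvLjust "Link State" cw.2.1,
     pvLjust "IP Address" cw.2.2.1, pvLjust "Media Type" cw.2.2.2] ++ " |".toList)
  let separator := String.ofList ("|".toList ++ PySem.Chars.join "|".toList
    ([cw.1, cw.2.1, cw.2.2.1, cw.2.2.2].map (fun w => List.replicate (w + 2) '-')) ++ "|".toList)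
  -- data rows: for interface_name in sorted(interfaces.keys()), explicit '+' concatenation
  let dataRows := (PySem.List.sorted idict.keys (fun x => x) false).map (fun n =>
    let d := PySem.Dict.ofList (idict.getD n [])
    let media_type := mdict.getD n "Unknown"
    String.ofList ("| ".toList ++ pvLjust n cw.1 ++ " | ".toList ++
      pvLjust (d.getD "link_state" "") cw.2.1 ++ " | ".toList ++
      pvLjust (d.getD "ip_address" "") cw.2.2.1 ++ " | ".toList ++
      pvLjust media_type cw.2.2.2 ++ " |".toList))
  PySem.Str.join "\n" (header_row :: separator :: dataRows)

-- ===== PORT B =====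
-- per-column step of B's loop: max(map(len, col)) (col is nonempty, lengths ≥ 0, so
-- foldl max 0 is exact), the padded column and the separator segment
def pvPadCol (col : List String) : List (List Char) × List Char :=
  let w := (col.map (fun s => s.toList.length)).foldl max 0
  (col.map (fun c => pvLjust c w), List.replicate (w + 2) '-')

-- zip(*padded) over the four padded columns
def pvZip4 {α β γ δ : Type} : List α → List β → List γ → List δ → List (α × β × γ × δ)
  | a :: as, b :: bs, c :: cs, d :: ds => (a, b, c, d) :: pvZip4 as bs cs ds
  | _, _, _, _ => []

def create_ascii_table_alt (interfaces : List (String × List (String × String))) (media_types : List (String × String)) : String :=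
  let idict := PySem.Dict.ofList interfaces
  let mdict := PySem.Dict.ofList media_types
  let names := PySem.List.sorted idict.keys (fun x => x) false
  let col0 := "Interface" :: names
  let col1 := "Link State" :: names.map (fun n => (PySem.Dict.ofList (idict.getD n [])).getD "link_state" "")
  let col2 := "IP Address" :: names.map (fun n => (PySem.Dict.ofList (idict.getD n [])).getD "ip_address" "")
  let col3 := "Media Type" :: names.map (fun n => mdict.getD n "Unknown")
  let p0 := pvPadCol col0
  let p1 := pvPadCol col1
  let p2 := pvPadCol col2
  let p3 := pvPadCol col3
  let lines := (pvZip4 p0.1 p1.1 p2.1 p3.1).map (fun r =>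
    String.ofList ("| ".toList ++ PySem.Chars.join " | ".toList [r.1, r.2.1, r.2.2.1, r.2.2.2] ++ " |".toList))
  let separator := String.ofList ("|".toList ++ PySem.Chars.join "|".toList [p0.2, p1.2, p2.2, p3.2] ++ "|".toList)
  -- lines[0] exists because every column starts with its header; '[]' is unreachable
  match lines with
  | l0 :: rest => PySem.Str.join "\n" (l0 :: separator :: rest)
  | [] => ""

-- ===== PRECONDITION & SPEC =====
-- Pre_ excludes exactly the inputs on which A raises KeyError: some interface whose data
-- dict lacks 'link_state' or 'ip_address'.
def Pre_create_ascii_table (interfaces : List (String × List (String × String))) (media_types : List (String × String)) : Prop :=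
  interfaces.all (fun p => (PySem.Dict.ofList p.2).contains "link_state" &&
                           (PySem.Dict.ofList p.2).contains "ip_address") = true
instance (interfaces : List (String × List (String × String))) (media_types : List (String × String)) : Decidable (Pre_create_ascii_table interfaces media_types) := by unfold Pre_create_ascii_table; infer_instance

def pvWitness_create_ascii_table : (List (String × List (String × String))) × (List (String × String)) :=
  ([("eth0", [("link_state", "up"), ("ip_address", "10.0.0.1")])], [("eth0", "Ethernet")])

def Spec_create_ascii_table (interfaces : List (String × List (String × String))) (media_types : List (String × String)) (out : String) : Prop := out = create_ascii_table_alt interfaces media_types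
instance (interfaces : List (String × List (String × String))) (media_types : List (String × String)) (out : String) : Decidable (Spec_create_ascii_table interfaces media_types out) := by unfold Spec_create_ascii_table; infer_instance

-- ===== CLAIM =====
def Claim_equal_create_ascii_table : Prop := ∀ (interfaces : List (String × List (String × String))) (media_types : List (String × String)), Dom_create_ascii_table interfaces media_types → Pre_create_ascii_table interfaces media_types → Spec_create_ascii_table interfaces media_types (create_ascii_table interfaces media_types)

-- ===== LEMMAS AND PROOFS =====

-- componentwise reading of A's 4-way running-max fold over the interface items
theorem pvFold4 {α : Type} (f0 f1 f2 f3 : α → Nat) (l : List α) (a b c d : Nat) :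
    l.foldl (fun (w : Nat × Nat × Nat × Nat) p =>
        (max w.1 (f0 p), max w.2.1 (f1 p), max w.2.2.1 (f2 p), max w.2.2.2 (f3 p))) (a, b, c, d)
      = ((l.map f0).foldl max a, (l.map f1).foldl max b, (l.map f2).foldl max c, (l.map f3).foldl max d) := by
  induction l generalizing a b c d with
  | nil => rfl
  | cons x t ih => simp only [List.foldl_cons, List.map_cons]; exact ih _ _ _ _

theorem pvZip4_cons {α β γ δ : Type} (a : α) (b : β) (c : γ) (d : δ) (as_ : List α) (bs : List β) (cs : List γ) (ds : List δ) :
    pvZip4 (a :: as_) (b :: bs) (c :: cs) (d :: ds) = (a, b, c, d) :: pvZip4 as_ bs cs ds := rfl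

-- zip(*padded) over four maps of the same list is one map of the 4-tuple
theorem pvZip4_map {α β γ δ ε : Type} (f0 : α → β) (f1 : α → γ) (f2 : α → δ) (f3 : α → ε) (l : List α) :
    pvZip4 (l.map f0) (l.map f1) (l.map f2) (l.map f3)
      = l.map (fun a => (f0 a, f1 a, f2 a, f3 a)) := by
  induction l with
  | nil => rfl
  | cons x t ih => simp [pvZip4, ih]

-- ===== VERDICT =====
theorem create_ascii_table_spec : Claim_equal_create_ascii_table := by
  intro i m _ _
  show create_ascii_table i m = create_ascii_table_alt i m
  unfold create_ascii_table create_ascii_table_alt pvPadCol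
  simp only []
  rw [pvFold4]
  rw [PySem.Dict.items_eq_map_keys (PySem.Dict.ofList i) (PySem.Dict.nodup_keys_ofList i) []]
  -- B's per-column max runs over header :: sorted keys, A's over headerLen and the dict's keys
  have hp : (PySem.List.sorted (PySem.Dict.ofList i).keys (fun x => x) false).Perm (PySem.Dict.ofList i).keys :=
    PySem.List.sorted_perm _ _ _
  have e0 : ∀ (g : String → Nat) (a : Nat),
      (List.map g (PySem.List.sorted (PySem.Dict.ofList i).keys (fun x => x) false)).foldl max a
        = (List.map g (PySem.Dict.ofList i).keys).foldl max a :=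
    fun g a => List.Perm.foldl_op_eq (hp.map g)
  simp only [List.map_cons, List.map_map, List.foldl_cons, Nat.zero_max, Function.comp_def, e0]
  rw [pvZip4_cons, pvZip4_map]
  simp only [List.map_cons]
  simp [PySem.Chars.join, List.intercalate, List.intersperse, List.append_assoc, Function.comp_def]
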